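-- pv_equiv track=rewrite | github.com/dudgns5845/AlgorithmStudy | 백준/구현/3085_사탕게임/sol_python.py | solution
-- ===== SOURCE A (Python) =====
-- def solution(board):
--
--     #크기 가져오기
--     n = len(board)
--
--     #순회를 하면서 최고값이 나타나면 값을 갱신. 최종 반환 값
--     answer = 1
--
--     #순회
--     for i in range(n):
--
--         #임시 변수
--         count = 1
--         # 열 순회(가로)
--         for j in range(1,n):
--             #이전 값과 같으면 증가
--             if board[i][j-1] == board[i][j]:
--                 count += 1
--             #같지 않으면 다시 1로 초기화
--             else:
--                 count = 1
--
--             # 위 조건을 체크하고 나왔을때 값이 최종값보다 크면 최종값을 갱신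
--             if count > answer:
--                 answer = count
--
--         # 행 순회(세로)
--         count = 1
--         for j in range(1,n):
--             if board[j-1][i] == board[j][i]:
--                 count += 1
--             else:
--                 count = 1
--             if count > answer:
--                 answer = count
--
--     return answer
-- ===== SOURCE B (Python) =====
-- def solution(board):
--     # Binary search on the answer: has_run(k) decides whether some row/column
--     # holds k equal consecutive cells (slice-vs-repeat comparison); the largest
--     # k with has_run(k) is found by bisection instead of any run-counting scan.
--     n = len(board)
--     if n <= 1:
--         return 1
--     lines = [row for row in board] + ["".join(r[i] for r in board) for i in range(n)]
--
--     def has_run(k):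
--         return any(line[j:j + k] == line[j] * k
--                    for line in lines for j in range(n - k + 1))
--
--     lo, hi = 1, n
--     while lo < hi:
--         mid = (lo + hi + 1) // 2
--         if has_run(mid):
--             lo = mid
--         else:
--             hi = mid - 1
--     return lo
-- ===== Notes on version B (the rewrite author's own statement) =====
-- stated objective: alternative
-- what changed: A's interleaved reset-counter scans over rows and columns are replaced by a binary search on the answer k, deciding 'some row or column holds k equal consecutive cells' by comparing each length-k slice with a repeated character.
import Mathlib
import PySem

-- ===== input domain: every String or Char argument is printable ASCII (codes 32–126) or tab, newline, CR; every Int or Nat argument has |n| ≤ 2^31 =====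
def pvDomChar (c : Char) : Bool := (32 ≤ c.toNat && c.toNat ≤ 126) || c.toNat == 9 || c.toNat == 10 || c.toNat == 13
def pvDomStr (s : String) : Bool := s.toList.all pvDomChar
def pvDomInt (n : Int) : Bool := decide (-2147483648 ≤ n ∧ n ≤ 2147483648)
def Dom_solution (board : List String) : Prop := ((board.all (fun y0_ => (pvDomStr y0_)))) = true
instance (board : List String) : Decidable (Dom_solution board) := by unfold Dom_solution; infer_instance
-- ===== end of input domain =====

-- B replaces A's interleaved reset-counter scans by a binary search on the answer k,
-- deciding "some row/column holds k equal consecutive cells" by slice-vs-repeat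
-- comparison; same return value, no argument is mutated by either version.

-- ===== PORT A =====
-- literal transliteration of A: outer loop over i, two inner reset-counter scans
-- (row i then column i); board[i][j] is ported at the Option level via pyGet?/bind,
-- exact wherever Python does not raise (Pre_ admits exactly those boards).
def solution (board : List String) : Int :=
  let n : Int := board.length
  (PySem.List.pyRange 0 n 1).foldl (fun answer i =>
    let a1 := ((PySem.List.pyRange 1 n 1).foldl (fun s j =>
        let cnt := if ((PySem.List.pyGet? board i).bind (fun rr => PySem.Str.pyGet? rr (j - 1))
                      = (PySem.List.pyGet? board i).bind (fun rr => PySem.Str.pyGet? rr j))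
                   then s.1 + 1 else (1 : Int)
        (cnt, if cnt > s.2 then cnt else s.2)) ((1 : Int), answer)).2
    ((PySem.List.pyRange 1 n 1).foldl (fun s j =>
        let cnt := if ((PySem.List.pyGet? board (j - 1)).bind (fun rr => PySem.Str.pyGet? rr i)
                      = (PySem.List.pyGet? board j).bind (fun rr => PySem.Str.pyGet? rr i))
                   then s.1 + 1 else (1 : Int)
        (cnt, if cnt > s.2 then cnt else s.2)) ((1 : Int), a1)).2) 1

-- ===== PORT B =====
-- port of Source B: has_run(k) — any line with a length-k constant segment; Python's flat
-- 'any(... for line in lines for j in ...)' is the nested any; line[j:j+k] is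
-- PySem.List.slice, line[j]*k is List.replicate (j is in range under Pre_, so pyGetD
-- with a default is exact).
def hasRunB (lines : List (List Char)) (n k : Int) : Bool :=
  lines.any (fun line =>
    (PySem.List.pyRange 0 (n - k + 1) 1).any (fun j =>
      PySem.List.slice line (some j) (some (j + k)) == List.replicate k.toNat (PySem.List.pyGetD line j ' ')))

-- midpoint bounds, used only for termination of the binary-search loop below
theorem bsearch_mid_bounds (lo hi : Int) (h : lo < hi) :
    lo < PySem.Int.floordiv (lo + hi + 1) 2 ∧ PySem.Int.floordiv (lo + hi + 1) 2 ≤ hi := by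
  rw [PySem.Int.floordiv_eq_ediv_of_pos (by omega)]
  omega

-- Source B's 'while lo < hi' loop, as well-founded recursion on hi - lo
def bsearchB (pred : Int → Bool) (lo hi : Int) : Int :=
  if h : lo < hi then
    let mid := PySem.Int.floordiv (lo + hi + 1) 2
    if pred mid then bsearchB pred mid hi else bsearchB pred lo (mid - 1)
  else lo
termination_by (hi - lo).toNat
decreasing_by
  · have := bsearch_mid_bounds lo hi h; omega
  · have := bsearch_mid_bounds lo hi h; omega

def solution_alt (board : List String) : Int :=
  let n : Int := board.length
  if n ≤ 1 then 1
  else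
    let lines : List (List Char) :=
      board.map String.toList ++
        (PySem.List.pyRange 0 n 1).map (fun i => board.map (fun r => PySem.List.pyGetD r.toList i ' '))
    bsearchB (fun k => hasRunB lines n k) 1 n

-- ===== PRECONDITION & SPEC =====
-- Pre_ excludes exactly the boards where Python A raises IndexError: height n ≥ 2
-- with some row shorter than n (A indexes board[i][j] for all i < n, 1 ≤ j < n).
def Pre_solution (board : List String) : Prop :=
  board.length ≤ 1 ∨ ∀ r ∈ board, board.length ≤ r.toList.length
instance (board : List String) : Decidable (Pre_solution board) := by
  unfold Pre_solution; infer_instance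

def pvWitness_solution : List String := ["aab", "bbb", "cab"]

def Spec_solution (board : List String) (out : Int) : Prop := out = solution_alt board
instance (board : List String) (out : Int) : Decidable (Spec_solution board out) := by
  unfold Spec_solution; infer_instance

-- ===== CLAIM (what is proved, stated in full; the proofs are below) =====
def Claim_equal_solution : Prop :=
  ∀ (board : List String), Dom_solution board → Pre_solution board →
    Spec_solution board (solution board)

-- ===== LEMMAS AND PROOFS =====

-- longest run of equal consecutive elements of a line (0 for the empty line)
def lineMax (line : List Char) : Int :=
  match line with
  | [] => 0
  | c :: rest =>
      max (1 + ((rest.takeWhile (fun x => x = c)).length : Int))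
        (lineMax (rest.dropWhile (fun x => x = c)))
termination_by line.length
decreasing_by
  simp only [List.length_cons]
  exact Nat.lt_succ_of_le (List.length_dropWhile_le _ _)

-- A's reset-counter state, as a recursion on the remaining cells
def auxMax (prev : Char) (count : Int) : List Char → Int
  | [] => count
  | c :: r => if c = prev then auxMax c (count + 1) r else max count (auxMax c 1 r)

theorem auxMax_ge (cs : List Char) : ∀ prev count, count ≤ auxMax prev count cs := by
  induction cs with
  | nil => intro _ _; simp [auxMax]
  | cons c r ih =>
    intro prev count
    simp only [auxMax]
    split
    · exact le_trans (by omega) (ih c (count + 1))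
    · omega

theorem auxMax_eq (cs : List Char) : ∀ (prev : Char) (count : Int), 0 ≤ count →
    auxMax prev count cs
      = max (count + (((cs.takeWhile (fun x => x = prev)).length : Nat) : Int))
          (lineMax (cs.dropWhile (fun x => x = prev))) := by
  induction cs with
  | nil => intro prev count h; simp [auxMax, lineMax]; omega
  | cons c r ih =>
    intro prev count h
    by_cases hc : c = prev
    · subst hc
      simp only [auxMax, List.takeWhile_cons, List.dropWhile_cons, decide_true, if_true]
      rw [ih c (count + 1) (by omega)]
      simp only [List.length_cons]
      omega
    · simp only [auxMax, List.takeWhile_cons, List.dropWhile_cons, hc, decide_false,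
        Bool.false_eq_true, if_false]
      rw [ih c 1 (by omega), lineMax]
      simp only [List.length_nil, Nat.cast_zero]
      omega

theorem lineMax_cons (c : Char) (rest : List Char) :
    lineMax (c :: rest) = auxMax c 1 rest := by
  rw [auxMax_eq rest c 1 (by omega), lineMax]

-- A's inner-loop step, reading cells through f
def stepF (f : Int → Option Char) (s : Int × Int) (j : Int) : Int × Int :=
  let cnt := if f (j - 1) = f j then s.1 + 1 else (1 : Int)
  (cnt, if cnt > s.2 then cnt else s.2)

theorem stepF_pos (f : Int → Option Char) (s : Int × Int) (j : Int)
    (h : f (j - 1) = f j) :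
    stepF f s j = (s.1 + 1, if s.1 + 1 > s.2 then s.1 + 1 else s.2) := by
  simp [stepF, h]

theorem stepF_neg (f : Int → Option Char) (s : Int × Int) (j : Int)
    (h : ¬ f (j - 1) = f j) :
    stepF f s j = (1, if (1 : Int) > s.2 then 1 else s.2) := by
  simp [stepF, h]

-- the inner reset-counter fold of A over indices k..len(cs)
theorem inner_fold (cs : List Char) (f : Int → Option Char)
    (hf : ∀ t : Nat, t < cs.length → f (t : Int) = cs[t]?) :
    ∀ (m k : Nat) (prev : Char) (count best : Int),
      cs.length - k = m → 1 ≤ k → k ≤ cs.length → cs[k - 1]? = some prev →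
      0 ≤ count → count ≤ best → 1 ≤ best →
      ((PySem.List.pyRange (k : Int) (cs.length : Int) 1).foldl (stepF f) (count, best)).2
        = max best (auxMax prev count (cs.drop k)) := by
  intro m
  induction m with
  | zero =>
    intro k prev count best hm hk1 hkle _ hc0 hcb hb1
    have hk : k = cs.length := by omega
    subst hk
    rw [PySem.List.pyRange_one_eq_nil (by omega)]
    simp [auxMax]
    omega
  | succ m ih =>
    intro k prev count best hm hk1 hkle hprev hc0 hcb hb1
    have hklt : k < cs.length := by omega
    rw [PySem.List.pyRange_one_cons (by exact_mod_cast hklt), List.foldl_cons]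
    have hfk : f (k : Int) = some cs[k] := by
      rw [hf k hklt]; simp [List.getElem?_eq_getElem hklt]
    have hfk1 : f ((k : Int) - 1) = some prev := by
      have : ((k : Int) - 1) = ((k - 1 : Nat) : Int) := by omega
      rw [this, hf (k - 1) (by omega), hprev]
    have hdrop : cs.drop k = cs[k] :: cs.drop (k + 1) :=
      (List.getElem_cons_drop hklt).symm
    have hnext : ((k : Int) + 1) = ((k + 1 : Nat) : Int) := by omega
    have hprev' : cs[(k + 1) - 1]? = some cs[k] := by
      simp [List.getElem?_eq_getElem hklt]
    by_cases heq : cs[k] = prev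
    · have hcond : f ((k : Int) - 1) = f (k : Int) := by rw [hfk1, hfk, heq]
      rw [stepF_pos f (count, best) (k : Int) hcond]
      rw [hnext, ih (k + 1) cs[k] (count + 1) _ (by omega) (by omega) (by omega) hprev'
        (by omega) (by split <;> omega) (by split <;> omega)]
      rw [hdrop,
        show auxMax prev count (cs[k] :: cs.drop (k + 1))
            = auxMax cs[k] (count + 1) (cs.drop (k + 1)) from by simp [auxMax, heq]]
      have := auxMax_ge (cs.drop (k + 1)) cs[k] (count + 1)
      split_ifs <;> omega
    · have hcond : ¬ f ((k : Int) - 1) = f (k : Int) := by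
        rw [hfk1, hfk]
        intro h
        exact heq (Option.some.inj h).symm
      rw [stepF_neg f (count, best) (k : Int) hcond]
      rw [hnext, ih (k + 1) cs[k] 1 _ (by omega) (by omega) (by omega) hprev'
        (by omega) (by split <;> omega) (by split <;> omega)]
      rw [hdrop,
        show auxMax prev count (cs[k] :: cs.drop (k + 1))
            = max count (auxMax cs[k] 1 (cs.drop (k + 1))) from by simp [auxMax, heq]]
      have := auxMax_ge (cs.drop (k + 1)) cs[k] 1
      split_ifs <;> omega

-- inner fold from index 1 computes max best (lineMax cs), for nonempty cs
theorem inner_pass (cs : List Char) (f : Int → Option Char)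
    (hf : ∀ t : Nat, t < cs.length → f (t : Int) = cs[t]?)
    (hne : cs ≠ []) (best : Int) (hb : 1 ≤ best) :
    ((PySem.List.pyRange 1 (cs.length : Int) 1).foldl (stepF f) ((1 : Int), best)).2
      = max best (lineMax cs) := by
  obtain ⟨c, rest, rfl⟩ := List.exists_cons_of_ne_nil hne
  have H := inner_fold (c :: rest) f hf ((c :: rest).length - 1) 1 c 1 best rfl
    (by omega) (by simp) (by simp) (by omega) (by omega) hb
  simp only [Nat.cast_one] at H
  rw [H, List.drop_one, List.tail_cons, lineMax_cons]

-- fold congruence preserving the lower bound 1 on the accumulator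
theorem foldl_inv_congr {α : Type} (F G : Int → α → Int) :
    ∀ (l : List α) (a : Int), 1 ≤ a →
      (∀ x ∈ l, ∀ b : Int, 1 ≤ b → F b x = G b x) →
      (∀ (b : Int) (x : α), 1 ≤ b → 1 ≤ G b x) →
      l.foldl F a = l.foldl G a := by
  intro l
  induction l with
  | nil => intro a _ _ _; rfl
  | cons x t ih =>
    intro a ha hFG hG
    simp only [List.foldl_cons]
    rw [hFG x (by simp) a ha]
    exact ih (G a x) (hG a x ha) (fun y hy => hFG y (by simp [hy])) hG

-- the interleaved row/column maxima of A, as a recursion on the number of passes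
def bigA (r c : Nat → Int) : Nat → Int
  | 0 => 1
  | m + 1 => max (max (bigA r c m) (r m)) (c m)

theorem interleaved_eq_bigA (r c : Nat → Int) : ∀ m : Nat,
    (List.range m).foldl (fun a t => max (max a (r t)) (c t)) 1 = bigA r c m := by
  intro m
  induction m with
  | zero => rfl
  | succ m ih =>
    rw [List.range_succ, List.foldl_append]
    simp only [List.foldl_cons, List.foldl_nil, bigA, ih]

theorem bigA_ge_one (r c : Nat → Int) : ∀ m, 1 ≤ bigA r c m := by
  intro m
  induction m with
  | zero => simp [bigA]
  | succ m ih => simp only [bigA]; omega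

theorem bigA_le_bound (r c : Nat → Int) (B : Int) (hB : 1 ≤ B) : ∀ m,
    (∀ t, t < m → r t ≤ B) → (∀ t, t < m → c t ≤ B) → bigA r c m ≤ B := by
  intro m
  induction m with
  | zero => intro _ _; simpa [bigA] using hB
  | succ m ih =>
    intro hr hc
    have h1 := ih (fun t ht => hr t (by omega)) (fun t ht => hc t (by omega))
    have h2 := hr m (by omega)
    have h3 := hc m (by omega)
    simp only [bigA]
    omega

theorem le_bigA_iff (r c : Nat → Int) (k : Int) : ∀ m,
    (k ≤ bigA r c m ↔ k ≤ 1 ∨ ∃ t, t < m ∧ (k ≤ r t ∨ k ≤ c t)) := by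
  intro m
  induction m with
  | zero =>
    simp only [bigA]
    constructor
    · intro h; exact Or.inl h
    · rintro (h | ⟨t, ht, _⟩)
      · exact h
      · omega
  | succ m ih =>
    simp only [bigA]
    constructor
    · intro h
      rcases le_or_gt k (bigA r c m) with h1 | h1
      · rcases ih.mp h1 with h2 | ⟨t, ht, h3⟩
        · exact Or.inl h2
        · exact Or.inr ⟨t, by omega, h3⟩
      · have : k ≤ r m ∨ k ≤ c m := by omega
        exact Or.inr ⟨m, by omega, this⟩
    · rintro (h | ⟨t, ht, h3⟩)
      · have := bigA_ge_one r c m; omega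
      · rcases Nat.lt_succ_iff_lt_or_eq.mp ht with ht' | rfl
        · have := ih.mpr (Or.inr ⟨t, ht', h3⟩); omega
        · omega

-- ----- characterisation of lineMax via constant segments -----

theorem lineMax_le_length_aux (N : Nat) : ∀ cs : List Char, cs.length ≤ N →
    lineMax cs ≤ (cs.length : Int) := by
  induction N with
  | zero =>
    intro cs h
    have : cs = [] := List.eq_nil_of_length_eq_zero (Nat.le_zero.mp h)
    subst this; simp [lineMax]
  | succ N ih =>
    intro cs h
    match cs with
    | [] => simp [lineMax]
    | c :: rest =>
      rw [lineMax]
      have h1 : (rest.takeWhile (fun x => x = c)).length ≤ rest.length :=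
        (List.takeWhile_sublist _).length_le
      have h2 : (rest.dropWhile (fun x => x = c)).length ≤ rest.length :=
        List.length_dropWhile_le _ _
      have h3 := ih (rest.dropWhile (fun x => x = c))
        (by simp only [List.length_cons] at h; omega)
      simp only [List.length_cons]
      push_cast
      omega

theorem lineMax_le_length (cs : List Char) : lineMax cs ≤ (cs.length : Int) :=
  lineMax_le_length_aux cs.length cs (Nat.le_refl _)

-- pointwise reading of a 'segment = replicate' equation
theorem seg_pointwise (cs : List Char) (j k : Nat) (ch : Char)
    (hjk : j + k ≤ cs.length) (h : (cs.drop j).take k = List.replicate k ch) :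
    ∀ i, i < k → cs[j + i]? = some ch := by
  intro i hi
  have hlen : ((cs.drop j).take k).length = k := by
    simp [List.length_take, List.length_drop]
    omega
  have h1 : ((cs.drop j).take k)[i]'(by omega) = ch := by
    rw [List.getElem_of_eq h]; simp
  rw [List.getElem_take, List.getElem_drop] at h1
  rw [List.getElem?_eq_getElem (by omega : j + i < cs.length)]
  exact congrArg some h1

theorem dropWhile_head_false {p : Char → Bool} :
    ∀ (l : List Char) (x : Char) (xs : List Char), l.dropWhile p = x :: xs → p x = false := by
  intro l
  induction l with
  | nil => intro x xs h; simp [List.dropWhile] at h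
  | cons a t ih =>
    intro x xs h
    rw [List.dropWhile_cons] at h
    split at h
    · exact ih x xs h
    · rename_i hp
      cases h
      simpa using hp

-- k ≤ lineMax cs ↔ cs has a constant segment of length k (for 1 ≤ k)
theorem lineMax_char_aux (N : Nat) : ∀ cs : List Char, cs.length ≤ N → ∀ k : Nat, 1 ≤ k →
    ((∃ j ch, j + k ≤ cs.length ∧ (cs.drop j).take k = List.replicate k ch)
      ↔ (k : Int) ≤ lineMax cs) := by
  induction N with
  | zero =>
    intro cs h k hk
    have : cs = [] := List.eq_nil_of_length_eq_zero (Nat.le_zero.mp h)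
    subst this
    simp only [lineMax, List.length_nil]
    constructor
    · rintro ⟨j, ch, hjk, _⟩; omega
    · intro h; omega
  | succ N ih =>
    intro cs hN k hk
    match cs with
    | [] =>
      simp only [lineMax, List.length_nil]
      constructor
      · rintro ⟨j, ch, hjk, _⟩; omega
      · intro h; omega
    | c :: rest =>
      set tw := rest.takeWhile (fun x => x = c) with htw
      set dw := rest.dropWhile (fun x => x = c) with hdw
      set g : Nat := tw.length + 1 with hg
      have htwrep : tw = List.replicate tw.length c := by
        rw [List.eq_replicate_iff]
        refine ⟨rfl, fun b hb => ?_⟩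
        have := List.mem_takeWhile_imp hb
        simpa using this
      have hsplit : c :: rest = List.replicate g c ++ dw := by
        rw [hg, List.replicate_succ]
        simp only [List.cons_append, List.cons.injEq, true_and]
        rw [← htwrep]
        exact (List.takeWhile_append_dropWhile).symm
      have hlen : (c :: rest).length = g + dw.length := by
        rw [hsplit]; simp
      have hlm : lineMax (c :: rest) = max (g : Int) (lineMax dw) := by
        rw [lineMax, ← htw, ← hdw, hg]
        push_cast
        ring_nf
      have hdwlen : dw.length ≤ N := by
        have := List.length_dropWhile_le (fun x => decide (x = c)) rest
        simp only [List.length_cons] at hN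
        rw [hdw]
        omega
      rw [hlm]
      constructor
      · rintro ⟨j, ch, hjk, hseg⟩
        rcases le_or_gt (j + k) g with hcase | hcase
        · -- inside the first group
          have hkg : k ≤ g := by omega
          have : (k : Int) ≤ (g : Int) := by exact_mod_cast hkg
          exact le_trans this (le_max_left _ _)
        · rcases le_or_gt g j with hcase2 | hcase2
          · -- inside dw
            have hdropeq : (c :: rest).drop j = dw.drop (j - g) := by
              rw [hsplit, List.drop_append, List.drop_eq_nil_of_le (by simpa using hcase2),
                List.nil_append, List.length_replicate]
            have hjk' : (j - g) + k ≤ dw.length := by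
              rw [hlen] at hjk; omega
            have := (ih dw hdwlen k hk).mp ⟨j - g, ch, hjk', by rw [← hdropeq]; exact hseg⟩
            exact le_trans this (le_max_right _ _)
          · -- straddles the group boundary: contradiction
            exfalso
            have hdwne : dw ≠ [] := by
              have hpos : 0 < dw.length := by omega
              exact List.ne_nil_of_length_pos hpos
            obtain ⟨x, xs, hx⟩ := List.exists_cons_of_ne_nil hdwne
            have hxc : ¬ x = c := by
              have := dropWhile_head_false rest x xs (by rw [← hdw, hx])
              simpa using this
            have hp1 := seg_pointwise _ j k ch hjk hseg (g - 1 - j) (by omega)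
            have hp2 := seg_pointwise _ j k ch hjk hseg (g - j) (by omega)
            rw [show j + (g - 1 - j) = g - 1 by omega] at hp1
            rw [show j + (g - j) = g by omega] at hp2
            have hlength : g < (c :: rest).length := by rw [hlen, hx]; simp
            have hv1 : (c :: rest)[g - 1]'(by omega) = c := by
              have hlt : g - 1 < (List.replicate g c).length := by simp [hg]
              rw [List.getElem_of_eq hsplit, List.getElem_append_left hlt]
              simp
            have hv2 : (c :: rest)[g]'(by omega) = x := by
              rw [List.getElem_of_eq hsplit, List.getElem_append_right (by simp)]
              simp [hx]
            rw [List.getElem?_eq_getElem (by omega : g - 1 < (c :: rest).length),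
              Option.some.injEq, hv1] at hp1
            rw [List.getElem?_eq_getElem hlength, Option.some.injEq, hv2] at hp2
            exact hxc (by rw [hp2, ← hp1])
      · intro hkle
        rcases le_or_gt (k : Int) (g : Int) with hcase | hcase
        · -- first group provides the segment
          have hkg : k ≤ g := by exact_mod_cast hcase
          refine ⟨0, c, ?_, ?_⟩
          · rw [hlen]; omega
          · rw [List.drop_zero, hsplit, List.take_append_of_le_length (by simp; omega),
              List.take_replicate]
            congr 1
            omega
        · have hkdw : (k : Int) ≤ lineMax dw := by omega
          obtain ⟨j, ch, hjk, hseg⟩ := (ih dw hdwlen k hk).mpr hkdw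
          refine ⟨g + j, ch, by rw [hlen]; omega, ?_⟩
          have hdropeq : (c :: rest).drop (g + j) = dw.drop j := by
            rw [hsplit, List.drop_append, List.drop_eq_nil_of_le (by simp),
              List.nil_append, List.length_replicate, Nat.add_sub_cancel_left]
          rw [hdropeq]
          exact hseg

theorem lineMax_char (cs : List Char) (k : Nat) (hk : 1 ≤ k) :
    (∃ j ch, j + k ≤ cs.length ∧ (cs.drop j).take k = List.replicate k ch)
      ↔ (k : Int) ≤ lineMax cs :=
  lineMax_char_aux cs.length cs (Nat.le_refl _) k hk

-- the inner any of has_run, for one line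
theorem inner_any_iff (line : List Char) (n' k' : Nat) (hk1 : 1 ≤ k') (hkn : k' ≤ n')
    (hlen : n' ≤ line.length) :
    ((PySem.List.pyRange 0 ((n' : Int) - (k' : Int) + 1) 1).any (fun j =>
        PySem.List.slice line (some j) (some (j + (k' : Int)))
          == List.replicate ((k' : Int)).toNat (PySem.List.pyGetD line j ' ')) = true)
      ↔ (∃ j ch, j + k' ≤ (line.take n').length
          ∧ ((line.take n').drop j).take k' = List.replicate k' ch) := by
  have hcast : ((n' : Int) - (k' : Int) + 1) = ((n' - k' + 1 : Nat) : Int) := by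
    push_cast [hkn]; omega
  rw [hcast, PySem.List.pyRange_zero_natCast]
  rw [List.any_map, List.any_eq_true]
  have hclip : (line.take n').length = n' := by simp [List.length_take]; omega
  have hsegeq : ∀ j : Nat, j + k' ≤ n' →
      ((line.take n').drop j).take k' = (line.drop j).take k' := by
    intro j hj
    rw [List.drop_take, List.take_take]
    congr 1
    omega
  constructor
  · rintro ⟨j', hj'mem, hj'⟩
    have hj'lt : j' < n' - k' + 1 := List.mem_range.mp hj'mem
    simp only [Function.comp] at hj'
    rw [PySem.List.slice_natCast_add, Int.toNat_natCast, PySem.List.pyGetD_natCast,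
      beq_iff_eq] at hj'
    refine ⟨j', line.getD j' ' ', by omega, ?_⟩
    rw [hsegeq j' (by omega)]
    exact hj'
  · rintro ⟨j, ch, hjk, hseg⟩
    rw [hclip] at hjk
    refine ⟨j, List.mem_range.mpr (by omega), ?_⟩
    simp only [Function.comp]
    rw [PySem.List.slice_natCast_add, Int.toNat_natCast, PySem.List.pyGetD_natCast,
      beq_iff_eq]
    have hseg' : (line.drop j).take k' = List.replicate k' ch := by
      rw [← hsegeq j hjk]; exact hseg
    have hch : line.getD j ' ' = ch := by
      have hjlt : j < line.length := by omega
      have h0 := seg_pointwise line j k' ch (by omega) hseg' 0 (by omega)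
      rw [Nat.add_zero, List.getElem?_eq_getElem hjlt, Option.some.injEq] at h0
      rw [List.getD_eq_getElem _ _ hjlt, h0]
    rw [hch]
    exact hseg'

-- binary-search correctness on a predicate that is 'k ≤ M' on the searched interval
theorem bsearchB_eq (pred : Int → Bool) (M : Int) : ∀ (N : Nat) (lo hi : Int),
    (hi - lo).toNat ≤ N → lo ≤ M → M ≤ hi →
    (∀ k, lo < k → k ≤ hi → (pred k = true ↔ k ≤ M)) →
    bsearchB pred lo hi = M := by
  intro N
  induction N with
  | zero =>
    intro lo hi hN hlo hhi _
    have hle : hi ≤ lo := by omega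
    rw [bsearchB]
    rw [dif_neg (by omega)]
    omega
  | succ N ih =>
    intro lo hi hN hlo hhi hpred
    rw [bsearchB]
    by_cases h : lo < hi
    · rw [dif_pos h]
      have hmid := bsearch_mid_bounds lo hi h
      set mid := PySem.Int.floordiv (lo + hi + 1) 2 with hmiddef
      by_cases hp : pred mid = true
      · rw [if_pos hp]
        have hMmid : mid ≤ M := (hpred mid (by omega) (by omega)).mp hp
        exact ih mid hi (by omega) hMmid hhi (fun k hk1 hk2 => hpred k (by omega) hk2)
      · rw [if_neg hp]
        have hMmid : M < mid := by
          by_contra hcon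
          exact hp ((hpred mid (by omega) (by omega)).mpr (by omega))
        exact ih lo (mid - 1) (by omega) hlo (by omega)
          (fun k hk1 hk2 => hpred k hk1 (by omega))
    · rw [dif_neg h]
      omega

-- ===== the main theorem =====
theorem solution_spec : Claim_equal_solution := by
  unfold Claim_equal_solution
  intro board _ hpre
  unfold Spec_solution
  show solution board = solution_alt board
  -- degenerate boards: both sides are 1
  by_cases hsmall : board.length ≤ 1
  · have hB : solution_alt board = 1 := by
      unfold solution_alt
      rw [if_pos (by exact_mod_cast hsmall)]
    have hA : solution board = 1 := by
      rcases (by omega : board.length = 0 ∨ board.length = 1) with h0 | h1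
      · have : board = [] := List.eq_nil_of_length_eq_zero h0
        subst this
        decide
      · obtain ⟨s, rfl⟩ := List.length_eq_one_iff.mp h1
        unfold solution
        simp only [List.length_cons, List.length_nil, Nat.zero_add, Nat.cast_one]
        rw [show PySem.List.pyRange 0 1 1 = [0] from by decide,
          show PySem.List.pyRange 1 1 1 = ([] : List Int) from by decide]
        simp
    rw [hA, hB]
  set n : Nat := board.length with hn
  -- main case: n ≥ 2, every row has length ≥ n
  have hrows : ∀ r ∈ board, n ≤ r.toList.length := by
    rcases hpre with h | h
    · intro r hr; omega
    · exact h
  have hn2 : 2 ≤ n := by omega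
  set r : Nat → Int := fun t => lineMax ((board.getD t "").toList.take n) with hr
  set c : Nat → Int := fun t => lineMax (board.map (fun rr => PySem.List.pyGetD rr.toList (t : Int) ' ')) with hc
  have hpy0 : PySem.List.pyRange 0 (n : Int) 1 = (List.range n).map (fun (t : Nat) => (t : Int)) :=
    PySem.List.pyRange_zero_natCast n
  -- row pass at outer index t
  have hrowpass : ∀ t : Nat, t < n → ∀ a : Int, 1 ≤ a →
      ((PySem.List.pyRange 1 (n : Int) 1).foldl
        (stepF (fun j => (PySem.List.pyGet? board (t : Int)).bind (fun rr => PySem.Str.pyGet? rr j)))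
        ((1 : Int), a)).2 = max a (r t) := by
    intro t ht a ha
    have htmem : board.getD t "" = board[t] := List.getD_eq_getElem board "" ht
    set cs : List Char := (board.getD t "").toList.take n with hcs
    have hcslen : cs.length = n := by
      rw [hcs, htmem]
      simp [List.length_take]
      exact hrows board[t] (List.getElem_mem ht)
    have hf : ∀ u : Nat, u < cs.length →
        ((PySem.List.pyGet? board (t : Int)).bind (fun rr => PySem.Str.pyGet? rr (u : Int))) = cs[u]? := by
      intro u hu
      have hun : u < n := by omega
      rw [PySem.List.pyGet?_natCast, List.getElem?_eq_getElem ht]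
      simp only [Option.bind_some, PySem.Str.pyGet?_natCast]
      rw [hcs, htmem]
      exact (List.getElem?_take_of_lt hun).symm
    have hne : cs ≠ [] := by
      intro h
      rw [h] at hcslen
      simp only [List.length_nil] at hcslen
      omega
    have := inner_pass cs (fun j => (PySem.List.pyGet? board (t : Int)).bind (fun rr => PySem.Str.pyGet? rr j)) hf hne a ha
    rw [hcslen] at this
    exact this
  -- column pass at outer index t
  have hcolpass : ∀ t : Nat, t < n → ∀ a : Int, 1 ≤ a →
      ((PySem.List.pyRange 1 (n : Int) 1).foldl
        (stepF (fun j => (PySem.List.pyGet? board j).bind (fun rr => PySem.Str.pyGet? rr (t : Int))))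
        ((1 : Int), a)).2 = max a (c t) := by
    intro t ht a ha
    set cs : List Char := board.map (fun rr => PySem.List.pyGetD rr.toList (t : Int) ' ') with hcs
    have hcslen : cs.length = n := by rw [hcs]; simp [hn]
    have hf : ∀ u : Nat, u < cs.length →
        ((PySem.List.pyGet? board (u : Int)).bind (fun rr => PySem.Str.pyGet? rr (t : Int))) = cs[u]? := by
      intro u hu
      have hun : u < n := by omega
      have hubd : u < board.length := by omega
      have htln : t < board[u].toList.length :=
        lt_of_lt_of_le ht (hrows board[u] (List.getElem_mem hubd))
      rw [PySem.List.pyGet?_natCast, List.getElem?_eq_getElem hubd]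
      simp only [Option.bind_some, PySem.Str.pyGet?_natCast]
      rw [List.getElem?_eq_getElem htln]
      rw [hcs, List.getElem?_map, List.getElem?_eq_getElem hubd]
      simp only [Option.map_some]
      congr 1
      rw [PySem.List.pyGetD_natCast, List.getD_eq_getElem _ ' ' htln]
    have hne : cs ≠ [] := by
      intro h
      rw [h] at hcslen
      simp only [List.length_nil] at hcslen
      omega
    have := inner_pass cs (fun j => (PySem.List.pyGet? board j).bind (fun rr => PySem.Str.pyGet? rr (t : Int))) hf hne a ha
    rw [hcslen] at this
    exact this
  -- A's body at outer index t, both passes combined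
  have hbody : ∀ t : Nat, t < n → ∀ b : Int, 1 ≤ b →
      ((PySem.List.pyRange 1 (n : Int) 1).foldl
        (stepF (fun j => (PySem.List.pyGet? board j).bind (fun rr => PySem.Str.pyGet? rr (t : Int))))
        ((1 : Int),
          ((PySem.List.pyRange 1 (n : Int) 1).foldl
            (stepF (fun j => (PySem.List.pyGet? board (t : Int)).bind (fun rr => PySem.Str.pyGet? rr j)))
            ((1 : Int), b)).2)).2 = max (max b (r t)) (c t) := by
    intro t ht b hb
    rw [hrowpass t ht b hb, hcolpass t ht (max b (r t)) (by omega)]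
  -- A side: the outer fold is bigA r c n
  have hA : solution board = bigA r c n := by
    show (PySem.List.pyRange 0 (n : Int) 1).foldl (fun answer i =>
        ((PySem.List.pyRange 1 (n : Int) 1).foldl
          (stepF (fun j => (PySem.List.pyGet? board j).bind (fun rr => PySem.Str.pyGet? rr i)))
          ((1 : Int),
            ((PySem.List.pyRange 1 (n : Int) 1).foldl
              (stepF (fun j => (PySem.List.pyGet? board i).bind (fun rr => PySem.Str.pyGet? rr j)))
              ((1 : Int), answer)).2)).2) 1 = bigA r c n
    rw [hpy0, List.foldl_map]
    refine (foldl_inv_congr _ (fun a t => max (max a (r t)) (c t)) (List.range n) 1 (by omega)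
      (fun t htm b hb => hbody t (List.mem_range.mp htm) b hb)
      (by intro b t hb; dsimp only; omega)).trans ?_
    exact interleaved_eq_bigA r c n
  rw [hA]
  -- B side: binary search on the answer
  set lines : List (List Char) :=
    board.map String.toList ++
      (PySem.List.pyRange 0 (n : Int) 1).map (fun i => board.map (fun rr => PySem.List.pyGetD rr.toList i ' ')) with hlines
  have hBdef : solution_alt board = bsearchB (fun k => hasRunB lines (n : Int) k) 1 (n : Int) := by
    unfold solution_alt
    rw [if_neg (by omega)]
  rw [hBdef]
  -- the predicate is 'k ≤ bigA r c n' on (1, n]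
  have hpredIff : ∀ k : Int, 1 < k → k ≤ (n : Int) →
      (hasRunB lines (n : Int) k = true ↔ k ≤ bigA r c n) := by
    intro k hk1 hkn
    set k' : Nat := k.toNat with hk'
    have hkk : k = (k' : Int) := by omega
    have hk'1 : 1 ≤ k' := by omega
    have hk'n : k' ≤ n := by omega
    have hone : ∀ line : List Char, n ≤ line.length →
        (((PySem.List.pyRange 0 ((n : Int) - k + 1) 1).any (fun j =>
            PySem.List.slice line (some j) (some (j + k))
              == List.replicate k.toNat (PySem.List.pyGetD line j ' ')) = true)
          ↔ (k ≤ lineMax (line.take n))) := by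
      intro line hlen
      rw [hkk]
      rw [inner_any_iff line n k' hk'1 hk'n hlen]
      have hclip : (line.take n).length = min n line.length := by simp [List.length_take]
      rw [lineMax_char (line.take n) k' hk'1]
    unfold hasRunB
    rw [List.any_eq_true]
    rw [le_bigA_iff r c k n]
    constructor
    · rintro ⟨line, hmem, hany⟩
      rcases List.mem_append.mp hmem with hmem | hmem
      · obtain ⟨s, hs, rfl⟩ := List.mem_map.mp hmem
        obtain ⟨t, ht, rfl⟩ := List.mem_iff_getElem.mp hs
        have := (hone board[t].toList (hrows board[t] (List.getElem_mem ht))).mp hany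
        refine Or.inr ⟨t, by omega, Or.inl ?_⟩
        show k ≤ lineMax (List.take n (board.getD t "").toList)
        rw [List.getD_eq_getElem board "" ht]
        exact this
      · rw [hpy0, List.mem_map] at hmem
        obtain ⟨ti, hti, rfl⟩ := hmem
        obtain ⟨t, ht, rfl⟩ := List.mem_map.mp hti
        have hcollen : n ≤ (board.map (fun rr => PySem.List.pyGetD rr.toList ((t : Nat) : Int) ' ')).length := by
          simp [hn]
        have := (hone _ hcollen).mp hany
        refine Or.inr ⟨t, List.mem_range.mp ht, Or.inr ?_⟩
        show k ≤ lineMax (List.map (fun rr => PySem.List.pyGetD rr.toList ((t : Nat) : Int) ' ') board)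
        rwa [List.take_of_length_le (by simp [hn])] at this
    · rintro (h | ⟨t, ht, hcase⟩)
      · omega
      · rcases hcase with hcase | hcase
        · refine ⟨board[t].toList, List.mem_append.mpr (Or.inl (List.mem_map_of_mem (List.getElem_mem ht))), ?_⟩
          rw [hone board[t].toList (hrows board[t] (List.getElem_mem ht))]
          have hcase2 : k ≤ lineMax (List.take n (board.getD t "").toList) := hcase
          rwa [List.getD_eq_getElem board "" ht] at hcase2
        · refine ⟨board.map (fun rr => PySem.List.pyGetD rr.toList ((t : Nat) : Int) ' '), ?_, ?_⟩
          · refine List.mem_append.mpr (Or.inr ?_)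
            rw [hpy0, List.mem_map]
            exact ⟨(t : Nat), List.mem_map_of_mem (List.mem_range.mpr ht), rfl⟩
          · have hcollen : n ≤ (board.map (fun rr => PySem.List.pyGetD rr.toList ((t : Nat) : Int) ' ')).length := by
              simp [hn]
            rw [hone _ hcollen]
            rw [List.take_of_length_le (by simp [hn])]
            exact hcase
  -- bounds on M
  have hM1 : 1 ≤ bigA r c n := bigA_ge_one r c n
  have hMn : bigA r c n ≤ (n : Int) := by
    refine bigA_le_bound r c (n : Int) (by omega) n ?_ ?_
    · intro t ht
      rw [hr]
      refine le_trans (lineMax_le_length _) ?_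
      have := hrows (board.getD t "") (by rw [List.getD_eq_getElem board "" ht]; exact List.getElem_mem ht)
      simp [List.length_take]
    · intro t ht
      rw [hc]
      refine le_trans (lineMax_le_length _) ?_
      simp [hn]
  exact (bsearchB_eq (fun k => hasRunB lines (n : Int) k) (bigA r c n)
    ((n : Int) - 1).toNat 1 (n : Int) (by omega) hM1 hMn
    (fun k hk1 hk2 => hpredIff k hk1 hk2)).symm

-- ===== VERDICT =====
-- (solution_spec above is the verdict theorem)
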